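-- pv_equiv track=rewrite | github.com/Handonggon/coding_test | 프로그래머스/2level/잉규식 알고리즘/모음사전.py | solution
-- ===== SOURCE A (Python) =====
-- def solution(word):
--     word_list = ['A','E','I','O','U']
--     temp_list = []
--
--     for i in range(4) :
--         for a in word_list :
--             for b in ['A','E','I','O','U'] :
--                 temp_list.append(a+b)
--         word_list += temp_list
--
--     word_list = list(set(word_list))
--     word_list = sorted(word_list)
--
--     return word_list.index(word)+1
-- ===== SOURCE B (Python) =====
-- def solution(word):
--     # Closed-form rank of `word` in the sorted dictionary of all vowel
--     # strings of length 1..5: each position i contributes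
--     # weights[i] * index-of-vowel + 1, where weights[i] = (5^(5-i)-1)/4.
--     weights = (781, 156, 31, 6, 1)
--     total = 0
--     for i, c in enumerate(word):
--         total += weights[i] * "AEIOU".index(c) + 1
--     return total
-- ===== Notes on version B (the rewrite author's own statement) =====
-- stated objective: faster
-- what changed: Replaces generating, deduplicating, sorting and linearly searching the whole 3905-word vowel dictionary with a closed-form positional rank: one pass over the (at most 5) characters of the word adding weights[i]*'AEIOU'.index(c)+1 with weights (781,156,31,6,1).
import Mathlib
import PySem

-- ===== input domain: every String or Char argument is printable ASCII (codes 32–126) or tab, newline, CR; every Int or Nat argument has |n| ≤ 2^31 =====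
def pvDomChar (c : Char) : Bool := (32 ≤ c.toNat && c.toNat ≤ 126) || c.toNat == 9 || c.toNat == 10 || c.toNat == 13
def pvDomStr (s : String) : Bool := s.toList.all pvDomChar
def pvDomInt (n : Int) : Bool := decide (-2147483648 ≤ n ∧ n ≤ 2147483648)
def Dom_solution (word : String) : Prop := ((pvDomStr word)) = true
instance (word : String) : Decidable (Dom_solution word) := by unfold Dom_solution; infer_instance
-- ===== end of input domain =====

-- B replaces A's generate/dedup/sort/linear-search of the whole vowel dictionary by the
-- closed-form positional rank of the word (objective: faster; one pass over ≤ 5 characters).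

-- ===== PORT A =====
-- Python 'a + b' on strings (exact: concatenation of the character lists).
def pvCat (a b : String) : String := String.ofList (a.toList ++ b.toList)

def solution (word : String) : Int :=
  -- word_list = ['A','E','I','O','U']; temp_list = []
  -- for i in range(4): for a in word_list: for b in ['A','E','I','O','U']: temp_list.append(a+b); word_list += temp_list
  let st :=
    (PySem.List.pyRange 0 4 1).foldl
      (fun st _ =>
        let tl := st.1.foldl
          (fun tl a => (["A","E","I","O","U"] : List String).foldl
            (fun tl b => tl ++ [pvCat a b]) tl) st.2
        (st.1 ++ tl, tl))
      ((["A","E","I","O","U"] : List String), ([] : List String))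
  -- word_list = sorted(list(set(word_list)))  (list(set(..)) is only deduplication here: sorted() fixes the order)
  let wl := PySem.List.sorted (PySem.Set.ofList st.1) (fun x => x) false
  -- return word_list.index(word) + 1   (an absent word is a ValueError: excluded by Pre_solution)
  (((PySem.List.index? wl word).getD 0 : Nat) : Int) + 1

-- ===== PORT B =====
def pvWeights : List Int := [781, 156, 31, 6, 1]

def solution_alt (word : String) : Int :=
  -- total = 0; for i, c in enumerate(word): total += weights[i] * "AEIOU".index(c) + 1
  -- ("AEIOU".index(c) ported as Chars.find, exact where Python's .index succeeds, i.e. on Pre_;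
  --  weights[i] via pyGet?, whose none (IndexError, len > 5) is excluded by Pre_)
  (PySem.List.enumerate word.toList).foldl
    (fun total ic =>
      total + (PySem.List.pyGet? pvWeights ic.1).getD 0 *
        PySem.Chars.find ['A', 'E', 'I', 'O', 'U'] [ic.2] + 1)
    0

-- ===== PRECONDITION & SPEC =====
-- Pre_: exactly the words of A's generated dictionary (1..5 vowels); on every other input
-- A's word_list.index(word) raises ValueError (and B's "AEIOU".index / weights[i] raise too).
def Pre_solution (word : String) : Prop :=
  1 ≤ word.toList.length ∧ word.toList.length ≤ 5 ∧
    word.toList.all (fun c => c ∈ (['A', 'E', 'I', 'O', 'U'] : List Char)) = true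
instance (word : String) : Decidable (Pre_solution word) := by unfold Pre_solution; infer_instance

def pvWitness_solution : String := "AE"

def Spec_solution (word : String) (out : Int) : Prop := out = solution_alt word
instance (word : String) (out : Int) : Decidable (Spec_solution word out) := by unfold Spec_solution; infer_instance

-- ===== CLAIM (what is proved, stated in full; the proofs are below) =====
def Claim_equal_solution : Prop := ∀ (word : String), Dom_solution word → Pre_solution word → Spec_solution word (solution word)

-- ===== LEMMAS AND PROOFS =====

-- The vowels, as characters.
def pvVowC : List Char := ['A', 'E', 'I', 'O', 'U']

-- All nonempty vowel words of length ≤ k, in lexicographic (DFS) order.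
def pvGen : Nat → List (List Char)
  | 0 => []
  | k + 1 => pvVowC.flatMap (fun v => [v] :: (pvGen k).map (v :: ·))

-- The 1-based-minus-1 position of a valid word inside pvGen k.
def pvPos : Nat → List Char → Nat
  | k + 1, c :: rest =>
      (PySem.List.index? pvVowC c).getD 0 * (1 + (pvGen k).length) +
        (if rest.isEmpty then 0 else 1 + pvPos k rest)
  | _, _ => 0

-- Validity of a character list as a dictionary word of length ≤ m.
def pvOk (m : Nat) (l : List Char) : Prop :=
  l ≠ [] ∧ l.length ≤ m ∧ ∀ c ∈ l, c ∈ pvVowC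

-- ---- generic index? lemmas ----

theorem pv_index?_append_of_not_mem {α : Type} [BEq α] [LawfulBEq α]
    (xs ys : List α) (v : α) (h : v ∉ xs) :
    PySem.List.index? (xs ++ ys) v = (PySem.List.index? ys v).map (· + xs.length) := by
  induction xs with
  | nil =>
      simp only [List.nil_append, List.length_nil]
      cases h : PySem.List.index? ys v <;> simp
  | cons x xs ih =>
      have hx : x ≠ v := fun he => h (he ▸ List.mem_cons_self)
      have h' : v ∉ xs := fun hm => h (List.mem_cons_of_mem _ hm)
      rw [List.cons_append, PySem.List.index?_cons_of_ne _ hx, ih h']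
      cases PySem.List.index? ys v <;> simp <;> omega

theorem pv_index?_map_inj {α β : Type} [BEq α] [LawfulBEq α] [BEq β] [LawfulBEq β]
    (f : α → β) (hf : Function.Injective f) (xs : List α) (a : α) :
    PySem.List.index? (xs.map f) (f a) = PySem.List.index? xs a := by
  induction xs with
  | nil => simp [PySem.List.index?]
  | cons x xs ih =>
      by_cases hxa : x = a
      · subst hxa; rw [List.map_cons, PySem.List.index?_cons_self, PySem.List.index?_cons_self]
      · have : f x ≠ f a := fun he => hxa (hf he)
        rw [List.map_cons, PySem.List.index?_cons_of_ne _ this,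
          PySem.List.index?_cons_of_ne _ hxa, ih]

-- ---- membership in pvGen ----

theorem pv_mem_gen : ∀ (k : Nat) (l : List Char), l ∈ pvGen k ↔ pvOk k l := by
  intro k
  induction k with
  | zero =>
      intro l
      simp only [pvGen, List.not_mem_nil, pvOk, false_iff]
      rintro ⟨hne, hlen, -⟩
      cases l with
      | nil => exact hne rfl
      | cons c t => simp at hlen
  | succ k ih =>
      intro l
      constructor
      · intro hl
        simp only [pvGen, List.mem_flatMap, List.mem_cons, List.mem_map] at hl
        obtain ⟨v, hv, hcase⟩ := hl
        rcases hcase with rfl | ⟨t, ht, rfl⟩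
        · exact ⟨by simp, by simp, by simpa using hv⟩
        · obtain ⟨hne, hlen, hall⟩ := (ih t).mp ht
          refine ⟨by simp, by simp; omega, ?_⟩
          intro c hc
          rcases List.mem_cons.mp hc with rfl | hc
          · exact hv
          · exact hall c hc
      · rintro ⟨hne, hlen, hall⟩
        cases l with
        | nil => exact absurd rfl hne
        | cons c rest =>
            simp only [pvGen, List.mem_flatMap, List.mem_cons, List.mem_map]
            refine ⟨c, hall c List.mem_cons_self, ?_⟩
            cases rest with
            | nil => exact Or.inl rfl
            | cons d t =>
                refine Or.inr ⟨d :: t, (ih _).mpr ⟨by simp, ?_, ?_⟩, rfl⟩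
                · simpa using Nat.le_of_succ_le_succ hlen
                · intro e he; exact hall e (List.mem_cons_of_mem _ he)

theorem pv_gen_ne_nil {k : Nat} {l : List Char} (h : l ∈ pvGen k) : l ≠ [] :=
  ((pv_mem_gen k l).mp h).1

-- ---- position of a valid word in a flatMap of uniformly-sized head-tagged blocks ----

theorem pv_index?_blocks (g : Char → List (List Char)) (L : Nat)
    (hL : ∀ v, (g v).length = L)
    (tgt : List Char) (c : Char)
    (htag : ∀ v, ∀ w ∈ g v, ∃ t, w = v :: t)
    (hhead : ∃ t, tgt = c :: t)
    (j : Nat) (hj : PySem.List.index? (g c) tgt = some j) :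
    ∀ (vs : List Char), c ∈ vs →
      PySem.List.index? (vs.flatMap g) tgt =
        some ((PySem.List.index? vs c).getD 0 * L + j) := by
  intro vs
  induction vs with
  | nil => intro h; exact absurd h (List.not_mem_nil)
  | cons u vs ih =>
      intro hc
      rw [List.flatMap_cons]
      by_cases huc : u = c
      · subst huc
        have hmem : tgt ∈ g u := by
          by_contra hnm
          rw [(PySem.List.index?_eq_none_iff _ _).mpr hnm] at hj
          simp at hj
        rw [PySem.List.index?_append_of_mem _ hmem, hj, PySem.List.index?_cons_self]
        simp
      · have hnm : tgt ∉ g u := by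
          intro hm
          obtain ⟨t, rfl⟩ := htag u tgt hm
          obtain ⟨t', ht'⟩ := hhead
          exact huc (by injection ht')
        have hcv : c ∈ vs := by
          rcases List.mem_cons.mp hc with rfl | h
          · exact absurd rfl huc
          · exact h
        rw [pv_index?_append_of_not_mem _ _ _ hnm, ih hcv,
          PySem.List.index?_cons_of_ne _ huc, hL u]
        cases hx : PySem.List.index? vs c with
        | none => exact absurd ((PySem.List.index?_eq_none_iff _ _).mp hx) (by simp; exact hcv)
        | some i =>
            simp only [Option.map_some, Option.getD_some]
            congr 1
            ring

-- index? over pvGen computes pvPos.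
theorem pv_index?_gen : ∀ (k : Nat) (l : List Char), pvOk k l →
    PySem.List.index? (pvGen k) l = some (pvPos k l) := by
  intro k
  induction k with
  | zero => rintro l ⟨hne, hlen, -⟩; cases l with
      | nil => exact absurd rfl hne
      | cons c t => simp at hlen
  | succ k ih =>
      rintro l ⟨hne, hlen, hall⟩
      cases l with
      | nil => exact absurd rfl hne
      | cons c rest =>
          have hc : c ∈ pvVowC := hall c List.mem_cons_self
          have htag : ∀ v, ∀ w ∈ ([v] :: (pvGen k).map (v :: ·)), ∃ t, w = v :: t := by
            intro v w hw
            rcases List.mem_cons.mp hw with rfl | hw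
            · exact ⟨[], rfl⟩
            · obtain ⟨t, -, rfl⟩ := List.mem_map.mp hw; exact ⟨t, rfl⟩
          have hLen : ∀ v, (([v] :: (pvGen k).map (v :: ·)) : List (List Char)).length
              = 1 + (pvGen k).length := by intro v; simp; omega
          have hj : PySem.List.index? ([c] :: (pvGen k).map (c :: ·)) (c :: rest) =
              some (if rest.isEmpty then 0 else 1 + pvPos k rest) := by
            cases rest with
            | nil => simpa using PySem.List.index?_cons_self ([c]) ((pvGen k).map (c :: ·))
            | cons d t =>
                have hne2 : ([c] : List Char) ≠ c :: d :: t := by simp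
                rw [PySem.List.index?_cons_of_ne _ hne2,
                  pv_index?_map_inj (c :: ·) (fun a b h => by injection h) _ _,
                  ih (d :: t) ⟨by simp, by simpa using Nat.le_of_succ_le_succ hlen,
                    fun e he => hall e (List.mem_cons_of_mem _ he)⟩]
                simp [Nat.add_comm]
          have := pv_index?_blocks (fun v => [v] :: (pvGen k).map (v :: ·))
            (1 + (pvGen k).length) hLen (c :: rest) c htag ⟨rest, rfl⟩ _ hj pvVowC hc
          rw [show pvGen (k + 1) = pvVowC.flatMap (fun v => [v] :: (pvGen k).map (v :: ·)) from rfl,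
            this]
          rfl

-- ---- lexicographic order of pvGen ----

theorem pv_pairwise_flatMap (vs : List Char) (g : Char → List (List Char))
    (hpw : ∀ v, (g v).Pairwise (fun a b => List.Lex (· < ·) a b))
    (htag : ∀ v, ∀ w ∈ g v, ∃ t, w = v :: t)
    (hvs : vs.Pairwise (· < ·)) :
    (vs.flatMap g).Pairwise (fun a b => List.Lex (· < ·) a b) := by
  induction vs with
  | nil => simp
  | cons u vs ih =>
      rw [List.flatMap_cons, List.pairwise_append]
      have hvs' := (List.pairwise_cons.mp hvs).2
      refine ⟨hpw u, ih hvs', ?_⟩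
      intro a ha b hb
      obtain ⟨v, hv, hbv⟩ := List.mem_flatMap.mp hb
      obtain ⟨t, rfl⟩ := htag u a ha
      obtain ⟨t', rfl⟩ := htag v b hbv
      exact List.Lex.rel ((List.pairwise_cons.mp hvs).1 v hv)

theorem pv_gen_pairwise : ∀ k, (pvGen k).Pairwise (fun a b => List.Lex (· < ·) a b) := by
  intro k
  induction k with
  | zero => simp [pvGen]
  | succ k ih =>
      refine pv_pairwise_flatMap _ _ ?_ ?_ (by decide)
      · intro v
        rw [List.pairwise_cons]
        constructor
        · intro b hb
          obtain ⟨t, ht, rfl⟩ := List.mem_map.mp hb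
          cases t with
          | nil => exact absurd rfl (pv_gen_ne_nil ht)
          | cons d t' => exact List.Lex.cons List.Lex.nil
        · rw [List.pairwise_map]
          exact ih.imp (fun h => List.Lex.cons h)
      · intro v w hw
        rcases List.mem_cons.mp hw with rfl | hw
        · exact ⟨[], rfl⟩
        · obtain ⟨t, -, rfl⟩ := List.mem_map.mp hw; exact ⟨t, rfl⟩

-- ---- A's loop: closed description and membership ----

def pvF (a : String) : List String := (["A","E","I","O","U"] : List String).map (fun b => pvCat a b)

def pvWT : Nat → List String × List String
  | 0 => (["A","E","I","O","U"], [])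
  | i + 1 =>
      let p := pvWT i
      (p.1 ++ (p.2 ++ p.1.flatMap pvF), p.2 ++ p.1.flatMap pvF)

theorem pv_step_eq (st : List String × List String) :
    st.1.foldl
      (fun tl a => (["A","E","I","O","U"] : List String).foldl
        (fun tl b => tl ++ [pvCat a b]) tl) st.2 = st.2 ++ st.1.flatMap pvF := by
  simp only [PySem.List.foldl_append_singleton_eq_map]
  exact PySem.List.foldl_append_eq_flatMap pvF st.1 st.2

theorem pv_build_eq :
    ((PySem.List.pyRange 0 4 1).foldl
      (fun st _ =>
        let tl := st.1.foldl
          (fun tl a => (["A","E","I","O","U"] : List String).foldl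
            (fun tl b => tl ++ [pvCat a b]) tl) st.2
        (st.1 ++ tl, tl))
      ((["A","E","I","O","U"] : List String), ([] : List String))).1 = (pvWT 4).1 := by
  have hstep : (fun (st : List String × List String) (_ : Int) =>
      let tl := st.1.foldl
        (fun tl a => (["A","E","I","O","U"] : List String).foldl
          (fun tl b => tl ++ [pvCat a b]) tl) st.2
      (st.1 ++ tl, tl)) =
      (fun (st : List String × List String) (_ : Int) =>
        (st.1 ++ (st.2 ++ st.1.flatMap pvF), st.2 ++ st.1.flatMap pvF)) := by
    funext st x
    simp only [pv_step_eq]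
  rw [show PySem.List.pyRange 0 4 1 = [0, 1, 2, 3] from rfl, hstep]
  rfl

theorem pv_mem_F (a : String) (x : String) :
    x ∈ pvF a ↔ ∃ v ∈ pvVowC, x = String.ofList (a.toList ++ [v]) := by
  simp only [pvF, List.mem_map, pvCat]
  constructor
  · rintro ⟨b, hb, rfl⟩
    fin_cases hb
    · exact ⟨'A', by decide, rfl⟩
    · exact ⟨'E', by decide, rfl⟩
    · exact ⟨'I', by decide, rfl⟩
    · exact ⟨'O', by decide, rfl⟩
    · exact ⟨'U', by decide, rfl⟩
  · rintro ⟨v, hv, rfl⟩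
    fin_cases hv
    · exact ⟨"A", by decide, rfl⟩
    · exact ⟨"E", by decide, rfl⟩
    · exact ⟨"I", by decide, rfl⟩
    · exact ⟨"O", by decide, rfl⟩
    · exact ⟨"U", by decide, rfl⟩

theorem pv_mem_flatMapF (wl : List String) (m : Nat)
    (hwl : ∀ x : String, x ∈ wl ↔ pvOk m x.toList) (x : String) :
    x ∈ wl.flatMap pvF ↔ (pvOk (m + 1) x.toList ∧ 2 ≤ x.toList.length) := by
  rw [List.mem_flatMap]
  constructor
  · rintro ⟨a, ha, hx⟩
    obtain ⟨v, hv, rfl⟩ := (pv_mem_F a x).mp hx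
    obtain ⟨hne, hlen, hall⟩ := (hwl a).mp ha
    have hlp : 1 ≤ a.toList.length := List.length_pos_iff.mpr hne
    rw [String.toList_ofList]
    refine ⟨⟨by simp, ?_, fun c hc => ?_⟩, ?_⟩
    · rw [List.length_append, List.length_singleton]; omega
    · rcases List.mem_append.mp hc with h | h
      · exact hall c h
      · rw [List.mem_singleton.mp h]; exact hv
    · rw [List.length_append, List.length_singleton]; omega
  · rintro ⟨⟨hne, hlen, hall⟩, h2⟩
    refine ⟨String.ofList x.toList.dropLast, ?_, ?_⟩
    · refine (hwl _).mpr ⟨?_, ?_, ?_⟩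
      · rw [String.toList_ofList]
        intro h
        have := congrArg List.length h
        rw [List.length_dropLast] at this
        simp only [List.length_nil] at this
        omega
      · rw [String.toList_ofList, x.toList.length_dropLast]; omega
      · rw [String.toList_ofList]
        intro c hc
        exact hall c (x.toList.dropLast_sublist.subset hc)
    · refine (pv_mem_F _ _).mpr ⟨x.toList.getLast hne, hall _ (x.toList.getLast_mem hne), ?_⟩
      rw [String.toList_ofList, List.dropLast_append_getLast hne, String.ofList_toList]

theorem pv_mem_WT : ∀ i, (∀ x : String, x ∈ (pvWT i).1 ↔ pvOk (i + 1) x.toList) ∧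
    (∀ x : String, x ∈ (pvWT i).2 ↔ (pvOk (i + 1) x.toList ∧ 2 ≤ x.toList.length)) := by
  intro i
  induction i with
  | zero =>
      constructor
      · intro x
        constructor
        · intro hx
          fin_cases hx <;> exact ⟨by simp, by simp, by simp [pvVowC]⟩
        · rintro ⟨hne, hlen, hall⟩
          cases hl : x.toList with
          | nil => exact absurd hl hne
          | cons c t =>
              cases t with
              | cons d t' => rw [hl] at hlen; simp at hlen
              | nil =>
                  have hc : c ∈ pvVowC := hall c (by rw [hl]; exact List.mem_cons_self)
                  rw [← String.ofList_toList (s := x), hl]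
                  fin_cases hc <;> decide
      · intro x
        simp only [pvWT, List.not_mem_nil, false_iff]
        rintro ⟨⟨-, hlen, -⟩, h2⟩
        omega
  | succ i ih =>
      have hFM := pv_mem_flatMapF (pvWT i).1 (i + 1) ih.1
      have hT2 : ∀ x : String, x ∈ (pvWT (i + 1)).2 ↔
          (pvOk (i + 2) x.toList ∧ 2 ≤ x.toList.length) := by
        intro x
        show x ∈ (pvWT i).2 ++ (pvWT i).1.flatMap pvF ↔ _
        rw [List.mem_append, ih.2, hFM]
        constructor
        · rintro (⟨⟨hne, hlen, hall⟩, h2⟩ | h)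
          · exact ⟨⟨hne, by omega, hall⟩, h2⟩
          · exact h
        · exact Or.inr
      refine ⟨?_, hT2⟩
      intro x
      show x ∈ (pvWT i).1 ++ ((pvWT i).2 ++ (pvWT i).1.flatMap pvF) ↔ _
      rw [List.mem_append, ih.1]
      have hT2' := hT2 x
      rw [show (pvWT (i + 1)).2 = (pvWT i).2 ++ (pvWT i).1.flatMap pvF from rfl] at hT2'
      rw [hT2']
      constructor
      · rintro (⟨hne, hlen, hall⟩ | ⟨h, -⟩)
        · exact ⟨hne, by omega, hall⟩
        · exact h
      · rintro ⟨hne, hlen, hall⟩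
        by_cases h2 : 2 ≤ x.toList.length
        · exact Or.inr ⟨⟨hne, hlen, hall⟩, h2⟩
        · have := List.length_pos_iff.mpr hne
          exact Or.inl ⟨hne, by omega, hall⟩

-- ---- the sorted deduplicated dictionary is pvGen 5 ----

theorem pv_strings_pairwise :
    ((pvGen 5).map String.ofList).Pairwise (fun a b => a < b) := by
  rw [List.pairwise_map]
  refine (pv_gen_pairwise 5).imp ?_
  intro a b h
  rw [String.lt_iff_toList_lt, String.toList_ofList, String.toList_ofList]
  exact (List.lt_iff_lex_lt _ _).mpr h

theorem pv_sorted_eq :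
    PySem.List.sorted (PySem.Set.ofList ((pvWT 4).1)) (fun x => x) false =
      (pvGen 5).map String.ofList := by
  refine PySem.List.sorted_eq_of_perm_of_pairwise_lt _ _ _ ?_ pv_strings_pairwise
  have hnd : ((pvGen 5).map String.ofList).Nodup :=
    pv_strings_pairwise.imp (fun h => ne_of_lt h)
  rw [List.perm_ext_iff_of_nodup hnd (PySem.Set.nodup_ofList _)]
  intro a
  rw [PySem.Set.mem_ofList, (pv_mem_WT 4).1 a, List.mem_map]
  constructor
  · rintro ⟨l, hl, rfl⟩
    rw [String.toList_ofList]
    exact (pv_mem_gen 5 l).mp hl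
  · intro h
    exact ⟨a.toList, (pv_mem_gen 5 a.toList).mpr h, String.ofList_toList⟩

-- ---- B computes pvPos + 1 ----

theorem pv_find_vow (c : Char) (hc : c ∈ pvVowC) :
    PySem.Chars.find ['A', 'E', 'I', 'O', 'U'] [c] =
      ((PySem.List.index? pvVowC c).getD 0 : Int) := by
  fin_cases hc <;> decide

theorem pv_glen (k : Nat) : (pvGen (k + 1)).length = 5 * (1 + (pvGen k).length) := by
  simp [pvGen, pvVowC]
  omega

theorem pv_fold_eq_pos (l : List Char) (hne : l ≠ []) (h5 : l.length ≤ 5)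
    (hall : ∀ c ∈ l, c ∈ pvVowC) :
    (PySem.List.enumerate l).foldl
      (fun total ic =>
        total + (PySem.List.pyGet? pvWeights ic.1).getD 0 *
          PySem.Chars.find ['A', 'E', 'I', 'O', 'U'] [ic.2] + 1)
      0 = (pvPos 5 l : Int) + 1 := by
  have g0 : (pvGen 0).length = 0 := rfl
  have g1 : (pvGen 1).length = 5 := by rw [pv_glen, g0]
  have g2 : (pvGen 2).length = 30 := by rw [pv_glen, g1]
  have g3 : (pvGen 3).length = 155 := by rw [pv_glen, g2]
  have g4 : (pvGen 4).length = 780 := by rw [pv_glen, g3]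
  have w0 : PySem.List.pyGet? pvWeights 0 = some 781 := by decide
  have w1 : PySem.List.pyGet? pvWeights 1 = some 156 := by decide
  have w2 : PySem.List.pyGet? pvWeights 2 = some 31 := by decide
  have w3 : PySem.List.pyGet? pvWeights 3 = some 6 := by decide
  have w4 : PySem.List.pyGet? pvWeights 4 = some 1 := by decide
  rcases l with _ | ⟨a, _ | ⟨b, _ | ⟨c, _ | ⟨d, _ | ⟨e, rest⟩⟩⟩⟩⟩
  · exact absurd rfl hne
  · have ha := hall a (by simp)
    rw [show PySem.List.enumerate [a] = [(0, a)] from rfl]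
    simp only [List.foldl_cons, List.foldl_nil, w0, Option.getD_some, pv_find_vow a ha,
      pvPos, g4, List.isEmpty_nil]
    push_cast
    ring
  · have ha := hall a (by simp)
    have hb := hall b (by simp)
    rw [show PySem.List.enumerate [a, b] = [(0, a), (1, b)] from rfl]
    simp only [List.foldl_cons, List.foldl_nil, w0, w1, Option.getD_some,
      pv_find_vow a ha, pv_find_vow b hb, pvPos, g4, g3, List.isEmpty_nil, List.isEmpty_cons]
    push_cast
    ring
  · have ha := hall a (by simp)
    have hb := hall b (by simp)
    have hc := hall c (by simp)
    rw [show PySem.List.enumerate [a, b, c] = [(0, a), (1, b), (2, c)] from rfl]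
    simp only [List.foldl_cons, List.foldl_nil, w0, w1, w2, Option.getD_some,
      pv_find_vow a ha, pv_find_vow b hb, pv_find_vow c hc,
      pvPos, g4, g3, g2, List.isEmpty_nil, List.isEmpty_cons]
    push_cast
    ring
  · have ha := hall a (by simp)
    have hb := hall b (by simp)
    have hc := hall c (by simp)
    have hd := hall d (by simp)
    rw [show PySem.List.enumerate [a, b, c, d] = [(0, a), (1, b), (2, c), (3, d)] from rfl]
    simp only [List.foldl_cons, List.foldl_nil, w0, w1, w2, w3, Option.getD_some,
      pv_find_vow a ha, pv_find_vow b hb, pv_find_vow c hc, pv_find_vow d hd,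
      pvPos, g4, g3, g2, g1, List.isEmpty_nil, List.isEmpty_cons]
    push_cast
    ring
  · cases rest with
    | cons f rest' => simp at h5; omega
    | nil =>
        have ha := hall a (by simp)
        have hb := hall b (by simp)
        have hc := hall c (by simp)
        have hd := hall d (by simp)
        have he := hall e (by simp)
        rw [show PySem.List.enumerate [a, b, c, d, e] =
          [(0, a), (1, b), (2, c), (3, d), (4, e)] from rfl]
        simp only [List.foldl_cons, List.foldl_nil, w0, w1, w2, w3, w4, Option.getD_some,
          pv_find_vow a ha, pv_find_vow b hb, pv_find_vow c hc, pv_find_vow d hd,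
          pv_find_vow e he, pvPos, g4, g3, g2, g1, g0, List.isEmpty_nil, List.isEmpty_cons]
        push_cast
        ring

theorem pv_alt_eq_pos (word : String) (h : Pre_solution word) :
    solution_alt word = (pvPos 5 word.toList : Int) + 1 := by
  obtain ⟨h1, h5, hall⟩ := h
  have hall' : ∀ c ∈ word.toList, c ∈ pvVowC := by
    simpa [List.all_eq_true, pvVowC] using hall
  exact pv_fold_eq_pos word.toList
    (List.length_pos_iff.mp (by omega)) h5 hall'

-- ===== VERDICT (by name: the statement is the Claim_ definition above) =====
theorem solution_spec : Claim_equal_solution := by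
  intro word hdom hpre
  obtain ⟨h1, h5, hall⟩ := hpre
  show solution word = solution_alt word
  have hall' : ∀ c ∈ word.toList, c ∈ pvVowC := by
    simpa [List.all_eq_true, pvVowC] using hall
  have hOk : pvOk 5 word.toList := ⟨List.length_pos_iff.mp (by omega), h5, hall'⟩
  have hinj : Function.Injective String.ofList := fun a b h => by
    have := congrArg String.toList h
    rwa [String.toList_ofList, String.toList_ofList] at this
  have hidx : PySem.List.index? ((pvGen 5).map String.ofList) word =
      some (pvPos 5 word.toList) := by
    conv_lhs => rw [← String.ofList_toList (s := word)]
    rw [pv_index?_map_inj String.ofList hinj, pv_index?_gen 5 word.toList hOk]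
  have hs : solution word =
      (((PySem.List.index? ((pvGen 5).map String.ofList) word).getD 0 : Nat) : Int) + 1 := by
    simp only [solution]
    rw [pv_build_eq, pv_sorted_eq]
  rw [hs, hidx, pv_alt_eq_pos word ⟨h1, h5, hall⟩]
  simp
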